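-- pv_equiv track=rewrite | github.com/danielmeint/aoc-23 | python/day02/main.py | compute_game_power
-- ===== SOURCE A (Python) =====
-- def compute_game_power(game):
--     # find max per color across all rounds
--     max_per_color = {}
--     for round in game:
--         for color, count in round.items():
--             if color not in max_per_color:
--                 max_per_color[color] = count
--             else:
--                 max_per_color[color] = max(max_per_color[color], count)
--
--     # compute power, i.e., multiply all maxes
--     power = 1
--     for color, count in max_per_color.items():
--         power *= count
--     return power
-- ===== SOURCE B (Python) =====
-- def compute_game_power(game):
--     # phase 1: collect the distinct colors, in order of first appearance
--     colors = []
--     for round in game: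
--         for color in round:
--             if color not in colors:
--                 colors.append(color)
--     # phase 2: for each color, rescan the whole game for its maximum count
--     power = 1
--     for color in colors:
--         power *= max(round[color] for round in game if color in round)
--     return power
-- ===== Notes on version B (the rewrite author's own statement) =====
-- stated objective: alternative
-- what changed: A keeps a dict of running maxima updated in a single pass; B keeps no max accumulator at all: it first collects the distinct colors, then for each color rescans the entire game and takes max over that color's occurrences (per-color inner scan instead of hash accumulation).
import Mathlib
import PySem

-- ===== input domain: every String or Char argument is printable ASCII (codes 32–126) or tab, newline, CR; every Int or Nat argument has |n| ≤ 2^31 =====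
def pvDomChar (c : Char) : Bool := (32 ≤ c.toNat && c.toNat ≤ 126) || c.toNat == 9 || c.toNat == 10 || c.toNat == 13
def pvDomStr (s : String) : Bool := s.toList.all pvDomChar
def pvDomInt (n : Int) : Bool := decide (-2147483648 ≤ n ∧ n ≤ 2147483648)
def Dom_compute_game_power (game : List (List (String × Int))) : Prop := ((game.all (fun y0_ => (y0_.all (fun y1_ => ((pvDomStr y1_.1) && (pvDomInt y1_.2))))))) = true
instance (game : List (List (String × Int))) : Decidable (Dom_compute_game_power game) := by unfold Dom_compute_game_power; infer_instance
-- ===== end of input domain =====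

-- B keeps no max accumulator: it first collects the distinct colors in first-appearance
-- order, then for each color rescans the whole game and multiplies in the max of that
-- color's occurrences (objective: alternative).

-- ===== PORT A =====
-- Each round is a Python dict; the List (String × Int) argument is materialised as a
-- PySem.Dict (last value per key wins, first position kept) before iterating .items().
def compute_game_power (game : List (List (String × Int))) : Int :=
  let max_per_color : PySem.Dict String Int :=
    game.foldl (fun d round =>
      ((PySem.Dict.ofList round).items).foldl (fun d p =>
        if !d.contains p.1 then d.insert p.1 p.2
        else d.insert p.1 (max (d.getD p.1 0) p.2)) d) PySem.Dict.empty
  max_per_color.items.foldl (fun power p => power * p.2) 1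

-- ===== PORT B =====
-- 'for color in round' iterates the dict's keys; 'color not in colors' is a list
-- membership test; the max(...) generator ranges over the rounds containing the color
-- ('round[color]' = getD, whose default is never read since the filter guards it, and
-- the generator is nonempty since the color was collected in phase 1).
def compute_game_power_alt (game : List (List (String × Int))) : Int :=
  let colors : List String :=
    game.foldl (fun cs round =>
      ((PySem.Dict.ofList round).keys).foldl (fun cs c =>
        if !cs.contains c then cs ++ [c] else cs) cs) []
  colors.foldl (fun power c =>
    power * ((PySem.List.max?
        ((game.filter (fun r => (PySem.Dict.ofList r).contains c)).map
          (fun r => (PySem.Dict.ofList r).getD c 0)) (fun y => y)).getD 0)) 1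

-- ===== PRECONDITION & SPEC =====
def Spec_compute_game_power (game : List (List (String × Int))) (out : Int) : Prop := out = compute_game_power_alt game
instance (game : List (List (String × Int))) (out : Int) : Decidable (Spec_compute_game_power game out) := by unfold Spec_compute_game_power; infer_instance

-- ===== CLAIM (what is proved, stated in full; the proofs are below) =====
def Claim_equal_compute_game_power : Prop := ∀ (game : List (List (String × Int))), Dom_compute_game_power game → Spec_compute_game_power game (compute_game_power game)

-- ===== LEMMAS AND PROOFS =====

-- A's per-pair step, written with the branch inside the insert.
def pvStepA (d : PySem.Dict String Int) (p : String × Int) : PySem.Dict String Int :=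
  d.insert p.1 (if d.contains p.1 then max (d.getD p.1 0) p.2 else p.2)

-- running max over an Option accumulator (what A's dict entry for one color does)
def pvRmax (o : Option Int) (v : Int) : Option Int :=
  some (match o with | none => v | some m => max m v)

-- the flat list of (color, count) pairs A traverses
def pvPairs (game : List (List (String × Int))) : List (String × Int) :=
  (game.map (fun r => (PySem.Dict.ofList r).items)).flatten

theorem pvStepA_eq (d : PySem.Dict String Int) (p : String × Int) :
    (if !d.contains p.1 then d.insert p.1 p.2
     else d.insert p.1 (max (d.getD p.1 0) p.2)) = pvStepA d p := by
  unfold pvStepA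
  by_cases h : d.contains p.1 <;> simp [h]

theorem pvStepA_get? (d : PySem.Dict String Int) (p : String × Int) (c : String) :
    (pvStepA d p).get? c = if p.1 == c then pvRmax (d.get? c) p.2 else d.get? c := by
  unfold pvStepA pvRmax
  by_cases hc : p.1 = c
  · subst hc
    rw [PySem.Dict.get?_insert_self, PySem.Dict.contains_eq_isSome_get?,
        PySem.Dict.getD_eq_get?_getD]
    cases hg : d.get? p.1 <;> simp
  · rw [PySem.Dict.get?_insert, if_neg (fun h => hc h.symm)]
    simp [hc]

theorem pvFoldA_get? (l : List (String × Int)) (d : PySem.Dict String Int) (c : String) :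
    (l.foldl pvStepA d).get? c
      = (l.filter (fun p => p.1 == c)).foldl (fun o p => pvRmax o p.2) (d.get? c) := by
  induction l generalizing d with
  | nil => rfl
  | cons p t ih =>
      simp only [List.foldl_cons, ih, List.filter_cons]
      rw [pvStepA_get?]
      by_cases h : p.1 == c <;> simp [h]

theorem pvRmax_foldl_some (t : List (String × Int)) (a : Int) :
    t.foldl (fun o p => pvRmax o p.2) (some a)
      = some ((t.map (fun p => p.2)).foldl max a) := by
  induction t generalizing a with
  | nil => rfl
  | cons q t ih =>
      rw [List.foldl_cons, List.map_cons, List.foldl_cons]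
      have h1 : pvRmax (some a) q.2 = some (max a q.2) := rfl
      rw [h1]
      exact ih (max a q.2)

-- a Nodup list filtered for one element is that element once (or nothing)
theorem pvFilter_nodup {α : Type} [DecidableEq α] (l : List α) (hnd : l.Nodup) (c : α) :
    l.filter (fun x => x == c) = if c ∈ l then [c] else [] := by
  induction l with
  | nil => simp
  | cons x t ih =>
      rw [List.filter_cons]
      rcases List.nodup_cons.mp hnd with ⟨hx, hnt⟩
      by_cases hxc : x = c
      · subst hxc
        simp [ih hnt, hx]
      · simp only [beq_iff_eq, hxc, List.mem_cons]
        rw [ih hnt]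
        by_cases hc : c ∈ t <;> simp [hc, Ne.symm hxc]

-- one round's items filtered for a color: the singleton (c, round[c]) (or nothing)
theorem pvItems_filter (r : List (String × Int)) (c : String) :
    (((PySem.Dict.ofList r).items.filter (fun p => p.1 == c)).map (fun p => p.2))
      = if (PySem.Dict.ofList r).contains c then [(PySem.Dict.ofList r).getD c 0] else [] := by
  have hnd : (PySem.Dict.ofList r).keys.Nodup := PySem.Dict.nodup_keys_ofList r
  rw [PySem.Dict.items_eq_map_keys _ hnd 0, List.filter_map, List.map_map]
  have : ((PySem.Dict.ofList r).keys.filter (fun k => k == c))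
      = if c ∈ (PySem.Dict.ofList r).keys then [c] else [] := pvFilter_nodup _ hnd c
  simp only [Function.comp_def] at this ⊢
  rw [this, PySem.Dict.contains_eq_decide_mem_keys]
  by_cases hc : c ∈ (PySem.Dict.ofList r).keys <;> simp [hc]

-- B's per-color scan list = the values of A's flat pair list filtered for that color
theorem pvScan_eq (game : List (List (String × Int))) (c : String) :
    ((game.filter (fun r => (PySem.Dict.ofList r).contains c)).map
        (fun r => (PySem.Dict.ofList r).getD c 0))
      = ((pvPairs game).filter (fun p => p.1 == c)).map (fun p => p.2) := by
  induction game with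
  | nil => rfl
  | cons r t ih =>
      unfold pvPairs at ih ⊢
      rw [List.map_cons, List.flatten_cons, List.filter_append, List.map_append,
          ← ih, List.filter_cons, pvItems_filter]
      by_cases hc : (PySem.Dict.ofList r).contains c <;> simp [hc]

theorem compute_game_power_spec : Claim_equal_compute_game_power := by
  intro game _
  unfold Spec_compute_game_power compute_game_power compute_game_power_alt
  -- flatten A's nested fold into one pass over pvPairs game
  have hA : game.foldl (fun d round =>
        ((PySem.Dict.ofList round).items).foldl (fun d p =>
          if !d.contains p.1 then d.insert p.1 p.2
          else d.insert p.1 (max (d.getD p.1 0) p.2)) d) PySem.Dict.empty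
      = (pvPairs game).foldl pvStepA PySem.Dict.empty := by
    unfold pvPairs
    rw [List.foldl_flatten, List.foldl_map]
    refine PySem.List.foldl_congr_mem _ _ _ _ (fun d r _ => ?_)
    exact PySem.List.foldl_congr_mem _ _ _ _ (fun d p _ => pvStepA_eq d p)
  -- B's colors list is the first-occurrence dedup of the flat key list
  have hC : game.foldl (fun cs round =>
        ((PySem.Dict.ofList round).keys).foldl (fun cs c =>
          if !cs.contains c then cs ++ [c] else cs) cs) []
      = PySem.Set.ofList ((pvPairs game).map (fun p => p.1)) := by
    unfold pvPairs
    rw [List.map_flatten, List.map_map]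
    have hstep : ∀ (cs : List String) (c : String),
        (if !cs.contains c then cs ++ [c] else cs) = PySem.Set.add cs c := by
      intro cs c
      rw [PySem.Set.add_eq_ite]
      by_cases h : c ∈ cs <;> simp [h]
    calc game.foldl (fun cs round =>
            ((PySem.Dict.ofList round).keys).foldl (fun cs c =>
              if !cs.contains c then cs ++ [c] else cs) cs) []
        = game.foldl (fun cs round =>
            ((PySem.Dict.ofList round).keys).foldl PySem.Set.add cs) [] := by
          refine PySem.List.foldl_congr_mem _ _ _ _ (fun cs r _ => ?_)
          exact PySem.List.foldl_congr_mem _ _ _ _ (fun cs c _ => hstep cs c)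
      _ = ((game.map (fun r => ((PySem.Dict.ofList r).items.map (fun p => p.1)))).flatten).foldl
            PySem.Set.add [] := by
          rw [List.foldl_flatten, List.foldl_map]
          rfl
      _ = PySem.Set.ofList
            ((game.map (fun r => ((PySem.Dict.ofList r).items.map (fun p => p.1)))).flatten) := by
          rw [PySem.Set.ofList_eq_foldl]
  rw [hA, hC]
  set L := pvPairs game with hL
  set dA := L.foldl pvStepA PySem.Dict.empty with hdA
  have hkA : dA.keys = PySem.Set.ofList (L.map (fun p => p.1)) := by
    rw [hdA]
    have := PySem.Dict.keys_foldl_insert_key L (fun p => p.1)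
      (fun d p => if d.contains p.1 then max (d.getD p.1 0) p.2 else p.2) PySem.Dict.empty
    simpa [pvStepA, PySem.Set.update_nil_left] using this
  have hndA : dA.keys.Nodup := by
    rw [hkA]; exact PySem.Set.nodup_ofList _
  -- A's product as a fold over its keys
  dsimp only
  rw [PySem.Dict.items_eq_map_keys dA hndA 0, List.foldl_map, hkA]
  refine PySem.List.foldl_congr_mem _ _ _ _ (fun pw c hc => ?_)
  -- per color: A's stored running max = max of B's per-color scan list
  have hcmem : c ∈ L.map (fun p => p.1) := (PySem.Set.mem_ofList _ _).mp hc
  have hflt : L.filter (fun p => p.1 == c) ≠ [] := by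
    rcases List.mem_map.mp hcmem with ⟨p, hp, hpc⟩
    intro hnil
    have : p ∈ L.filter (fun p => p.1 == c) := by
      rw [List.mem_filter]; exact ⟨hp, by simp [hpc]⟩
    simp [hnil] at this
  have hgA : dA.get? c = (L.filter (fun p => p.1 == c)).foldl (fun o p => pvRmax o p.2) none := by
    rw [hdA, pvFoldA_get?]; rfl
  rw [pvScan_eq game c, ← hL]
  rcases hq : L.filter (fun p => p.1 == c) with _ | ⟨q, t⟩
  · exact absurd hq hflt
  · have hA2 : dA.getD c 0 = (t.map (fun p => p.2)).foldl max q.2 := by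
      rw [PySem.Dict.getD_eq_get?_getD, hgA, hq, List.foldl_cons]
      have h0 : pvRmax none q.2 = some q.2 := rfl
      rw [h0, pvRmax_foldl_some]
      rfl
    rw [hq, List.map_cons, PySem.List.max?_id_cons, hA2]
    rfl
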